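-- pv_equiv track=rewrite | github.com/Saima-Chaity/Leetcode | OA/Driver's Ratings Over N Days.py | driversRatings
-- ===== SOURCE A (Python) =====
-- def driversRatings(ratings):
--
--     prefixSum = [0] * (len(ratings) + 1)
--     for i in range(0, len(ratings)):
--         prefixSum[i+1] = prefixSum[i] + ratings[i]
--
--     stack = []
--     leftIndex = [-1] * len(ratings)
--     for i in range(len(ratings)):
--         while stack and ratings[stack[-1]] > ratings[i]:
--             stack.pop()
--         leftIndex[i] = -1 if not stack else stack[-1]
--         stack.append(i)
--
--     stack = []
--     rightIndex = [len(ratings)] * len(ratings)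
--     for i in range(len(ratings)-1, -1, -1):
--         while stack and ratings[stack[-1]] > ratings[i]:
--             stack.pop()
--         rightIndex[i] = len(ratings) if not stack else stack[-1]
--         stack.append(i)
--
--     maximum = float('-inf')
--     for i in range(len(ratings)):
--         current = ratings[i] * (prefixSum[rightIndex[i]] - prefixSum[leftIndex[i]+1])
--         maximum = max(maximum, current)
--     return maximum
-- ===== SOURCE B (Python) =====
-- def driversRatings(ratings):
--     best = float('-inf')
--     n = len(ratings)
--     for i, x in enumerate(ratings):
--         total = x
--         j = i - 1
--         while j >= 0 and ratings[j] > x: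
--             total += ratings[j]
--             j -= 1
--         j = i + 1
--         while j < n and ratings[j] > x:
--             total += ratings[j]
--             j += 1
--         best = max(best, x * total)
--     return best
-- ===== Notes on version B (the rewrite author's own statement) =====
-- stated objective: simpler
-- what changed: Replaced the prefix-sum array plus two monotonic-stack passes and a final pass with a single direct pass that, for each index, expands left and right while neighbours are strictly greater, summing the window inline.
-- outside the precondition, e.g. on driversRatings([]): A returns -inf, B returns -inf
import Mathlib
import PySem

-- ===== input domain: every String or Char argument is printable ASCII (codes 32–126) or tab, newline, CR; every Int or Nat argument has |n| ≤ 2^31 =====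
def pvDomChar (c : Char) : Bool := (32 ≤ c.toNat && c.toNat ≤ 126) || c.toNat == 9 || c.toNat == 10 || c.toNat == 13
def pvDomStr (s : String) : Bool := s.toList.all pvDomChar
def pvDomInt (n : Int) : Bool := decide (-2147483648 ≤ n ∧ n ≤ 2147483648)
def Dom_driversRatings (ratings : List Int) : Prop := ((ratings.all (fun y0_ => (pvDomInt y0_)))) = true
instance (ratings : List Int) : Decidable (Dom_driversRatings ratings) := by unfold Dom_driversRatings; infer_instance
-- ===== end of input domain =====

-- B replaces A's prefix-sum array + two monotonic-stack passes + final pass by one direct pass that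
-- expands each index's strictly-greater window inline (simpler and shorter; B is quadratic where A is linear).

-- ===== PORT A =====
-- All Python list indexing in A happens at in-range indices, so `getD _ 0` transliterates it exactly.
def pvGet (ratings : List Int) (j : Nat) : Int := ratings.getD j 0

-- prefixSum[i+1] = prefixSum[i] + ratings[i], built left to right
def pyPrefix (ratings : List Int) : List Int :=
  (List.range ratings.length).foldl (fun ps i => ps ++ [ps.getD i 0 + pvGet ratings i]) [0]

-- one iteration of A's left-to-right stack loop; the stack's top is the list head,
-- and Python's `while stack and ratings[stack[-1]] > ratings[i]: stack.pop()` is dropWhile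
def pyLeftStep (ratings : List Int) (st : List Nat × List Int) (i : Nat) : List Nat × List Int :=
  let s := st.1.dropWhile (fun j => decide (pvGet ratings j > pvGet ratings i))
  (i :: s, st.2 ++ [match s with | [] => (-1 : Int) | t :: _ => (t : Int)])

def pyLeft (ratings : List Int) : List Int :=
  ((List.range ratings.length).foldl (pyLeftStep ratings) ([], [])).2

-- one iteration of A's right-to-left stack loop; rightIndex is filled at descending i,
-- so consing at the front reproduces the final array
def pyRightStep (ratings : List Int) (st : List Nat × List Int) (i : Nat) : List Nat × List Int :=
  let s := st.1.dropWhile (fun j => decide (pvGet ratings j > pvGet ratings i))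
  (i :: s, (match s with | [] => (ratings.length : Int) | t :: _ => (t : Int)) :: st.2)

def pyRight (ratings : List Int) : List Int :=
  ((List.range ratings.length).reverse.foldl (pyRightStep ratings) ([], [])).2

-- `maximum = float('-inf')` is the `none` state of the Option accumulator; for empty input the
-- Python returns the float -inf itself (no int), which Pre_ excludes, so `.getD 0` is unreachable there.
def driversRatings (ratings : List Int) : Int :=
  let ps := pyPrefix ratings
  let li := pyLeft ratings
  let ri := pyRight ratings
  ((List.range ratings.length).foldl (fun (acc : Option Int) i =>
      let cur := pvGet ratings i * (ps.getD (ri.getD i 0).toNat 0 - ps.getD ((li.getD i 0) + 1).toNat 0)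
      some (match acc with | none => cur | some m => max m cur)) none).getD 0

-- ===== PORT B =====
-- sum of ratings[j], ratings[j-1], ... while they stay strictly above x, starting at j = i-1
-- (the argument is i, i.e. one past the scan start, so the scan is structural recursion)
def altLeftSum (ratings : List Int) (x : Int) : Nat → Int
  | 0 => 0
  | j + 1 => if pvGet ratings j > x then pvGet ratings j + altLeftSum ratings x j else 0

-- sum of ratings[j], ratings[j+1], ... while in range and strictly above x
def altRightSum (ratings : List Int) (x : Int) (j : Nat) : Int :=
  if j < ratings.length then
    if pvGet ratings j > x then pvGet ratings j + altRightSum ratings x (j + 1) else 0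
  else 0
termination_by ratings.length - j

-- `best = float('-inf')` is the `none` accumulator state, exactly as in port A
def driversRatings_alt (ratings : List Int) : Int :=
  ((List.range ratings.length).foldl (fun (acc : Option Int) i =>
      let x := pvGet ratings i
      let total := x + altLeftSum ratings x i + altRightSum ratings x (i + 1)
      some (match acc with | none => x * total | some m => max m (x * total))) none).getD 0

-- ===== PRECONDITION & SPEC =====
-- Pre_ excludes exactly the empty list, on which A returns float('-inf') — a float, not an int
-- (B returns the same float there).
def Pre_driversRatings (ratings : List Int) : Prop := ratings ≠ []
instance (ratings : List Int) : Decidable (Pre_driversRatings ratings) := by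
  unfold Pre_driversRatings; infer_instance

def pvWitness_driversRatings : List Int := [3, -1, 2, 2, -4]

def Spec_driversRatings (ratings : List Int) (out : Int) : Prop := out = driversRatings_alt ratings
instance (ratings : List Int) (out : Int) : Decidable (Spec_driversRatings ratings out) := by
  unfold Spec_driversRatings; infer_instance

-- ===== CLAIM (what is proved, stated in full; the proofs are below) =====
def Claim_equal_driversRatings : Prop := ∀ (ratings : List Int), Dom_driversRatings ratings → Pre_driversRatings ratings → Spec_driversRatings ratings (driversRatings ratings)

-- ===== LEMMAS AND PROOFS =====

-- j is on A's left stack after indices < i are processed: everything strictly between j and i is ≥ ratings[j]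
def predL (ratings : List Int) (i j : Nat) : Bool :=
  decide (∀ k < i, j < k → pvGet ratings j ≤ pvGet ratings k)

-- A's left stack (top first) after processing indices < i
def candL (ratings : List Int) (i : Nat) : List Nat :=
  ((List.range i).filter (predL ratings i)).reverse

-- the stack A's i-th left iteration sees after its pop loop
def popL (ratings : List Int) (i : Nat) : List Nat :=
  (candL ratings i).dropWhile (fun j => decide (pvGet ratings j > pvGet ratings i))

def lvalF (ratings : List Int) (i : Nat) : Int :=
  match popL ratings i with | [] => (-1 : Int) | t :: _ => (t : Int)

-- mirror notions for A's right-to-left pass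
def predR (ratings : List Int) (i j : Nat) : Bool :=
  decide (∀ k < j, i ≤ k → pvGet ratings j ≤ pvGet ratings k)

def candR (ratings : List Int) (i : Nat) : List Nat :=
  (List.range' i (ratings.length - i)).filter (predR ratings i)

def popR (ratings : List Int) (i : Nat) : List Nat :=
  (candR ratings (i + 1)).dropWhile (fun j => decide (pvGet ratings j > pvGet ratings i))

def rvalF (ratings : List Int) (i : Nat) : Int :=
  match popR ratings i with | [] => (ratings.length : Int) | t :: _ => (t : Int)

def pfx (ratings : List Int) (k : Nat) : Int := ∑ j ∈ Finset.range k, pvGet ratings j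

-- a Python pop-while loop is dropWhile; on a stack whose "≤ pivot" property is suffix-closed it is a filter
theorem dropWhile_eq_filter_of_pairwise {α : Type} (p : α → Bool) (l : List α)
    (h : l.Pairwise (fun a b => p a = true → p b = true)) :
    l.dropWhile (fun a => !p a) = l.filter p := by
  induction l with
  | nil => simp
  | cons a l ih =>
    rcases List.pairwise_cons.mp h with ⟨ha, hl⟩
    by_cases hp : p a = true
    · simp [List.dropWhile, List.filter, hp,
        List.filter_eq_self.mpr (fun b hb => ha b hb hp)]
    · simp [List.dropWhile, List.filter, hp, ih hl]

theorem candL_pairwise (ratings : List Int) (i : Nat) :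
    (candL ratings i).Pairwise (fun a b => b < a ∧ pvGet ratings b ≤ pvGet ratings a) := by
  unfold candL
  rw [List.pairwise_reverse]
  refine List.Pairwise.imp_of_mem ?_ (List.Pairwise.filter _ List.pairwise_lt_range)
  intro a b ha hb hab
  rcases List.mem_filter.mp ha with ⟨ha', hpa⟩
  rcases List.mem_filter.mp hb with ⟨hb', _⟩
  have hb'' := List.mem_range.mp hb'
  have := of_decide_eq_true hpa
  exact ⟨hab, this b hb'' hab⟩

theorem popL_eq_filter (ratings : List Int) (i : Nat) :
    popL ratings i = (candL ratings i).filter (fun j => decide (pvGet ratings j ≤ pvGet ratings i)) := by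
  unfold popL
  have hfun : (fun j => decide (pvGet ratings j > pvGet ratings i)) =
      (fun j => !(decide (pvGet ratings j ≤ pvGet ratings i))) := by
    funext j
    by_cases h : pvGet ratings j ≤ pvGet ratings i
    · simp [h, not_lt.mpr h]
    · simp [h, not_le.mp h]
  rw [hfun]
  refine dropWhile_eq_filter_of_pairwise _ _ ?_
  refine (candL_pairwise ratings i).imp ?_
  intro a b hab h1
  have h1' := of_decide_eq_true h1
  exact decide_eq_true (le_trans hab.2 h1')

theorem candL_succ (ratings : List Int) (i : Nat) :
    candL ratings (i + 1) = i :: popL ratings i := by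
  unfold candL
  rw [List.range_succ, List.filter_append]
  have hi : predL ratings (i + 1) i = true := by
    simp only [predL, decide_eq_true_iff]
    intro k hk hk2; omega
  have hcong : ∀ j ∈ List.range i, predL ratings (i + 1) j =
      (decide (pvGet ratings j ≤ pvGet ratings i) && predL ratings i j) := by
    intro j hj
    have hj' := List.mem_range.mp hj
    simp only [predL, ← Bool.decide_and, decide_eq_decide]
    constructor
    · intro H
      exact ⟨H i (by omega) hj', fun k hk hjk => H k (by omega) hjk⟩
    · rintro ⟨h1, h2⟩ k hk hjk
      rcases Nat.lt_succ_iff_lt_or_eq.mp hk with hk' | rfl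
      · exact h2 k hk' hjk
      · exact h1
  rw [List.filter_congr hcong, ← List.filter_filter]
  simp only [hi, List.filter_cons, List.filter_nil]
  rw [List.reverse_append, popL_eq_filter]
  unfold candL
  rw [List.filter_reverse]
  rfl

theorem pyLeft_foldl (ratings : List Int) (i : Nat) :
    (List.range i).foldl (pyLeftStep ratings) ([], []) =
      (candL ratings i, (List.range i).map (lvalF ratings)) := by
  induction i with
  | zero => simp [candL]
  | succ i ih =>
    rw [List.range_succ, List.foldl_append, ih, List.foldl_cons, List.foldl_nil]
    rw [candL_succ]
    simp [pyLeftStep, popL, lvalF]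

theorem pyLeft_eq (ratings : List Int) :
    pyLeft ratings = (List.range ratings.length).map (lvalF ratings) := by
  unfold pyLeft
  rw [pyLeft_foldl]

-- the largest j < i with ratings[j] ≤ ratings[i] survives A's pop loop
theorem findGreatest_mem_popL (ratings : List Int) (i j : Nat) (hj : j < i)
    (hle : pvGet ratings j ≤ pvGet ratings i) :
    Nat.findGreatest (fun m => pvGet ratings m ≤ pvGet ratings i) (i - 1) ∈ popL ratings i ∧
      j ≤ Nat.findGreatest (fun m => pvGet ratings m ≤ pvGet ratings i) (i - 1) := by
  have hji : j ≤ i - 1 := by omega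
  have hPg : pvGet ratings (Nat.findGreatest (fun m => pvGet ratings m ≤ pvGet ratings i) (i - 1)) ≤
      pvGet ratings i := by simpa using Nat.findGreatest_spec (P := fun m => pvGet ratings m ≤ pvGet ratings i) hji hle
  have hg_le : Nat.findGreatest (fun m => pvGet ratings m ≤ pvGet ratings i) (i - 1) ≤ i - 1 :=
    Nat.findGreatest_le _
  have hg_lt : Nat.findGreatest (fun m => pvGet ratings m ≤ pvGet ratings i) (i - 1) < i := by omega
  refine ⟨?_, Nat.le_findGreatest hji hle⟩
  rw [popL_eq_filter]
  refine List.mem_filter.mpr ⟨?_, decide_eq_true hPg⟩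
  unfold candL
  rw [List.mem_reverse]
  refine List.mem_filter.mpr ⟨List.mem_range.mpr hg_lt, ?_⟩
  simp only [predL, decide_eq_true_iff]
  intro k hk hgk
  have hnk : ¬ pvGet ratings k ≤ pvGet ratings i := by
    simpa using Nat.findGreatest_is_greatest (P := fun m => pvGet ratings m ≤ pvGet ratings i) hgk (by omega)
  exact le_of_lt (lt_of_le_of_lt hPg (not_le.mp hnk))

theorem popL_nil (ratings : List Int) (i : Nat) (h : popL ratings i = []) :
    ∀ j < i, pvGet ratings i < pvGet ratings j := by
  intro j hj
  by_contra hc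
  have hle : pvGet ratings j ≤ pvGet ratings i := not_lt.mp hc
  have := (findGreatest_mem_popL ratings i j hj hle).1
  rw [h] at this
  exact List.not_mem_nil this

theorem popL_cons (ratings : List Int) (i t : Nat) (ts : List Nat) (h : popL ratings i = t :: ts) :
    t < i ∧ pvGet ratings t ≤ pvGet ratings i ∧
      ∀ k, t < k → k < i → pvGet ratings i < pvGet ratings k := by
  have ht : t ∈ popL ratings i := by rw [h]; exact List.mem_cons_self
  rw [popL_eq_filter] at ht
  rcases List.mem_filter.mp ht with ⟨htc, htq⟩
  have htq' := of_decide_eq_true htq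
  have hti : t < i := by
    unfold candL at htc
    rw [List.mem_reverse] at htc
    exact List.mem_range.mp (List.mem_filter.mp htc).1
  refine ⟨hti, htq', ?_⟩
  intro k hk1 hk2
  by_contra hc
  have hle : pvGet ratings k ≤ pvGet ratings i := not_lt.mp hc
  obtain ⟨hmem, hkg⟩ := findGreatest_mem_popL ratings i k hk2 hle
  rw [h] at hmem
  have hpair : (t :: ts).Pairwise (fun a b => b < a ∧ pvGet ratings b ≤ pvGet ratings a) := by
    rw [← h]
    exact (candL_pairwise ratings i).sublist (by unfold popL; exact List.dropWhile_sublist ..)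
  rcases List.mem_cons.mp hmem with rfl | hmem'
  · omega
  · have := (List.pairwise_cons.mp hpair).1 _ hmem'
    omega

theorem candR_pairwise (ratings : List Int) (i : Nat) :
    (candR ratings i).Pairwise (fun a b => a < b ∧ pvGet ratings b ≤ pvGet ratings a) := by
  unfold candR
  have hlt : (List.range' i (ratings.length - i)).Pairwise (· < ·) := by
    have := List.sortedLT_range' i (ratings.length - i) (by norm_num : (1 : Nat) ≠ 0)
    rw [List.sortedLT_iff_pairwise] at this
    exact this
  refine List.Pairwise.imp_of_mem ?_ (hlt.filter _)
  intro a b ha hb hab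
  rcases List.mem_filter.mp ha with ⟨ha', _⟩
  rcases List.mem_filter.mp hb with ⟨_, hpb⟩
  have hia : i ≤ a := (List.mem_range'_1.mp ha').1
  exact ⟨hab, of_decide_eq_true hpb a hab hia⟩

theorem popR_eq_filter (ratings : List Int) (i : Nat) :
    popR ratings i = (candR ratings (i + 1)).filter (fun j => decide (pvGet ratings j ≤ pvGet ratings i)) := by
  unfold popR
  have hfun : (fun j => decide (pvGet ratings j > pvGet ratings i)) =
      (fun j => !(decide (pvGet ratings j ≤ pvGet ratings i))) := by
    funext j
    by_cases h : pvGet ratings j ≤ pvGet ratings i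
    · simp [h, not_lt.mpr h]
    · simp [h, not_le.mp h]
  rw [hfun]
  refine dropWhile_eq_filter_of_pairwise _ _ ?_
  refine (candR_pairwise ratings (i + 1)).imp ?_
  intro a b hab h1
  exact decide_eq_true (le_trans hab.2 (of_decide_eq_true h1))

theorem candR_eq_cons (ratings : List Int) (i : Nat) (hi : i < ratings.length) :
    candR ratings i = i :: popR ratings i := by
  unfold candR
  have hn : ratings.length - i = (ratings.length - (i + 1)) + 1 := by omega
  rw [hn, List.range'_succ, List.filter_cons]
  have hii : predR ratings i i = true := by
    simp only [predR, decide_eq_true_iff]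
    intro k hk hik; omega
  rw [if_pos hii]
  have hcong : ∀ j ∈ List.range' (i + 1) (ratings.length - (i + 1)),
      predR ratings i j = (decide (pvGet ratings j ≤ pvGet ratings i) && predR ratings (i + 1) j) := by
    intro j hj
    have hj' : i + 1 ≤ j := (List.mem_range'_1.mp hj).1
    simp only [predR, ← Bool.decide_and, decide_eq_decide]
    constructor
    · intro H
      exact ⟨H i (by omega) (by omega), fun k hk hik => H k hk (by omega)⟩
    · rintro ⟨h1, h2⟩ k hk hik
      rcases Nat.lt_or_ge i k with hik' | hik'
      · exact h2 k hk (by omega)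
      · have : k = i := by omega
        subst this
        exact h1
  rw [List.filter_congr hcong, ← List.filter_filter, popR_eq_filter]
  rfl

theorem pyRight_foldl (ratings : List Int) (k m : Nat) (hk : m + k = ratings.length) :
    ((List.range' m k).reverse).foldl (pyRightStep ratings) ([], []) =
      (candR ratings m, (List.range' m k).map (rvalF ratings)) := by
  induction k generalizing m with
  | zero =>
    have : ratings.length - m = 0 := by omega
    simp [candR, this]
  | succ k ih =>
    have hm : m < ratings.length := by omega
    rw [List.range'_succ, List.reverse_cons, List.foldl_append, ih (m + 1) (by omega),
      List.foldl_cons, List.foldl_nil]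
    rw [candR_eq_cons ratings m hm]
    simp [pyRightStep, popR, rvalF]

theorem pyRight_eq (ratings : List Int) :
    pyRight ratings = (List.range ratings.length).map (rvalF ratings) := by
  unfold pyRight
  rw [List.range_eq_range', pyRight_foldl ratings ratings.length 0 (by omega)]

-- the smallest j > i with ratings[j] ≤ ratings[i] survives A's right pop loop
theorem find_mem_popR (ratings : List Int) (i : Nat)
    (hex : ∃ m, i < m ∧ m < ratings.length ∧ pvGet ratings m ≤ pvGet ratings i) :
    Nat.find hex ∈ popR ratings i := by
  obtain ⟨hg1, hg2, hg3⟩ := Nat.find_spec hex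
  rw [popR_eq_filter]
  refine List.mem_filter.mpr ⟨?_, decide_eq_true hg3⟩
  unfold candR
  refine List.mem_filter.mpr ⟨List.mem_range'_1.mpr ⟨by omega, by omega⟩, ?_⟩
  simp only [predR, decide_eq_true_iff]
  intro k hk hik
  have hnk := Nat.find_min hex hk
  have : pvGet ratings i < pvGet ratings k := by
    by_contra hcon
    exact hnk ⟨by omega, by omega, not_lt.mp hcon⟩
  exact le_of_lt (lt_of_le_of_lt hg3 this)

theorem popR_nil (ratings : List Int) (i : Nat) (h : popR ratings i = []) :
    ∀ j, i < j → j < ratings.length → pvGet ratings i < pvGet ratings j := by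
  intro j hj1 hj2
  by_contra hc
  have hex : ∃ m, i < m ∧ m < ratings.length ∧ pvGet ratings m ≤ pvGet ratings i :=
    ⟨j, hj1, hj2, not_lt.mp hc⟩
  have := find_mem_popR ratings i hex
  rw [h] at this
  exact List.not_mem_nil this

theorem popR_cons (ratings : List Int) (i t : Nat) (ts : List Nat) (h : popR ratings i = t :: ts) :
    i < t ∧ t < ratings.length ∧ pvGet ratings t ≤ pvGet ratings i ∧
      ∀ k, i < k → k < t → pvGet ratings i < pvGet ratings k := by
  have ht : t ∈ popR ratings i := by rw [h]; exact List.mem_cons_self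
  rw [popR_eq_filter] at ht
  rcases List.mem_filter.mp ht with ⟨htc, htq⟩
  have htq' := of_decide_eq_true htq
  rcases List.mem_range'_1.mp (List.mem_filter.mp htc).1 with ⟨ht1, ht2⟩
  have htn : t < ratings.length := by omega
  refine ⟨by omega, htn, htq', ?_⟩
  intro k hk1 hk2
  by_contra hc
  have hex : ∃ m, i < m ∧ m < ratings.length ∧ pvGet ratings m ≤ pvGet ratings i :=
    ⟨k, hk1, by omega, not_lt.mp hc⟩
  have hmem := find_mem_popR ratings i hex
  have hfk : Nat.find hex ≤ k := Nat.find_min' hex ⟨hk1, by omega, not_lt.mp hc⟩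
  rw [h] at hmem
  have hpair : (t :: ts).Pairwise (fun a b => a < b ∧ pvGet ratings b ≤ pvGet ratings a) := by
    rw [← h]
    exact (candR_pairwise ratings (i + 1)).sublist (by unfold popR; exact List.dropWhile_sublist ..)
  rcases List.mem_cons.mp hmem with heq | hmem'
  · omega
  · have := (List.pairwise_cons.mp hpair).1 _ hmem'
    omega

theorem pyPrefix_eq (ratings : List Int) :
    pyPrefix ratings = (List.range (ratings.length + 1)).map (pfx ratings) := by
  have key : ∀ i, i ≤ ratings.length →
      (List.range i).foldl (fun ps k => ps ++ [ps.getD k 0 + pvGet ratings k]) [0] =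
        (List.range (i + 1)).map (pfx ratings) := by
    intro i
    induction i with
    | zero => intro _; simp [pfx]
    | succ i ih =>
      intro hi
      rw [List.range_succ, List.foldl_append, ih (by omega), List.foldl_cons, List.foldl_nil]
      have hget : ((List.range (i + 1)).map (pfx ratings)).getD i 0 = pfx ratings i := by
        rw [List.getD_eq_getElem?_getD]
        simp
      rw [hget]
      have hstep : pfx ratings i + pvGet ratings i = pfx ratings (i + 1) := by
        unfold pfx
        rw [Finset.sum_range_succ]
      rw [hstep, List.range_succ (n := i + 1), List.map_append, List.map_singleton]
  exact key ratings.length le_rfl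

theorem pyPrefix_getD (ratings : List Int) (k : Nat) (hk : k ≤ ratings.length) :
    (pyPrefix ratings).getD k 0 = pfx ratings k := by
  rw [pyPrefix_eq, List.getD_eq_getElem?_getD]
  have : k < ratings.length + 1 := by omega
  simp [this]

theorem altLeftSum_eq (ratings : List Int) (x : Int) (a : Nat) :
    ∀ i, a ≤ i → (∀ k, a ≤ k → k < i → x < pvGet ratings k) →
      (a = 0 ∨ ¬ x < pvGet ratings (a - 1)) →
      altLeftSum ratings x i = ∑ k ∈ Finset.Ico a i, pvGet ratings k := by
  intro i
  induction i with
  | zero =>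
    intro ha _ _
    have h0 : a = 0 := Nat.le_zero.mp ha
    subst h0
    simp [altLeftSum]
  | succ i ih =>
    intro ha hgt hstop
    by_cases hai : a = i + 1
    · subst hai
      have hs : ¬ x < pvGet ratings i := by
        rcases hstop with h0 | h1
        · exact absurd h0 (Nat.succ_ne_zero i)
        · simpa using h1
      simp [altLeftSum, hs]
    · have hai' : a ≤ i := by omega
      have hgtI : x < pvGet ratings i := hgt i hai' (by omega)
      have hrec : altLeftSum ratings x (i + 1) = pvGet ratings i + altLeftSum ratings x i := by
        simp [altLeftSum, hgtI]
      rw [hrec, ih hai' (fun k hk1 hk2 => hgt k hk1 (by omega)) hstop,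
        Finset.sum_Ico_succ_top hai']
      ring

theorem altRightSum_eq (ratings : List Int) (x : Int) (b : Nat) (hb : b ≤ ratings.length)
    (hstop : b = ratings.length ∨ ¬ x < pvGet ratings b) :
    ∀ j, j ≤ b → (∀ k, j ≤ k → k < b → x < pvGet ratings k) →
      altRightSum ratings x j = ∑ k ∈ Finset.Ico j b, pvGet ratings k := by
  intro j hjb hgt
  obtain ⟨d, hd⟩ : ∃ d, b = j + d := ⟨b - j, by omega⟩
  clear hjb
  induction d generalizing j with
  | zero =>
    have hjb' : j = b := by omega
    subst hjb'
    rw [altRightSum]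
    rcases hstop with hbn | hxb
    · rw [if_neg (by omega)]
      simp
    · by_cases hb : j < ratings.length
      · rw [if_pos hb, if_neg hxb]
        simp
      · rw [if_neg hb]
        simp
  | succ d ih =>
    have hjb : j < b := by omega
    have hjn : j < ratings.length := by omega
    have hx : pvGet ratings j > x := hgt j le_rfl hjb
    rw [altRightSum, if_pos hjn, if_pos hx,
      ih (j + 1) (fun k hk1 hk2 => hgt k (by omega) hk2) (by omega),
      Finset.sum_eq_sum_Ico_succ_bot hjb]

-- the per-index values of the two final loops agree
theorem value_eq (ratings : List Int) (i : Nat) (hi : i < ratings.length) :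
    pvGet ratings i *
        ((pyPrefix ratings).getD (rvalF ratings i).toNat 0 -
          (pyPrefix ratings).getD ((lvalF ratings i) + 1).toNat 0) =
      pvGet ratings i *
        (pvGet ratings i + altLeftSum ratings (pvGet ratings i) i +
          altRightSum ratings (pvGet ratings i) (i + 1)) := by
  obtain ⟨a, ha_le, ha_gt, ha_stop, ha_lval⟩ :
      ∃ a : Nat, a ≤ i ∧ (∀ k, a ≤ k → k < i → pvGet ratings i < pvGet ratings k) ∧
        (a = 0 ∨ ¬ pvGet ratings i < pvGet ratings (a - 1)) ∧ ((lvalF ratings i) + 1).toNat = a := by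
    cases hL : popL ratings i with
    | nil =>
      exact ⟨0, by omega, fun k hk1 hk2 => popL_nil ratings i hL k hk2, Or.inl rfl,
        by simp [lvalF, hL]⟩
    | cons t ts =>
      obtain ⟨h1, h2, h3⟩ := popL_cons ratings i t ts hL
      exact ⟨t + 1, by omega, fun k hk1 hk2 => h3 k (by omega) hk2,
        Or.inr (by simpa using not_lt.mpr h2), by simp [lvalF, hL]⟩
  obtain ⟨b, hb_ge, hb_len, hb_gt, hb_stop, hb_rval⟩ :
      ∃ b : Nat, i < b ∧ b ≤ ratings.length ∧
        (∀ k, i < k → k < b → pvGet ratings i < pvGet ratings k) ∧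
        (b = ratings.length ∨ ¬ pvGet ratings i < pvGet ratings b) ∧ (rvalF ratings i).toNat = b := by
    cases hR : popR ratings i with
    | nil =>
      exact ⟨ratings.length, hi, le_rfl, fun k hk1 hk2 => popR_nil ratings i hR k hk1 hk2,
        Or.inl rfl, by simp [rvalF, hR]⟩
    | cons t ts =>
      obtain ⟨h1, h2, h3, h4⟩ := popR_cons ratings i t ts hR
      exact ⟨t, h1, by omega, fun k hk1 hk2 => h4 k hk1 hk2, Or.inr (not_lt.mpr h3),
        by simp [rvalF, hR]⟩
  rw [ha_lval, hb_rval, pyPrefix_getD ratings b hb_len, pyPrefix_getD ratings a (by omega),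
    altLeftSum_eq ratings (pvGet ratings i) a i ha_le ha_gt ha_stop,
    altRightSum_eq ratings (pvGet ratings i) b hb_len hb_stop (i + 1) (by omega)
      (fun k hk1 hk2 => hb_gt k (by omega) hk2)]
  congr 1
  unfold pfx
  rw [← Finset.sum_Ico_eq_sub _ (by omega : a ≤ b),
    ← Finset.sum_Ico_consecutive _ (show a ≤ i by omega) (show i ≤ b by omega),
    Finset.sum_eq_sum_Ico_succ_bot hb_ge]
  ring

theorem foldl_max_congr (f g : Nat → Int) (l : List Nat) (h : ∀ i ∈ l, f i = g i) :
    ∀ acc : Option Int,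
      l.foldl (fun acc i => some (match acc with | none => f i | some m => max m (f i))) acc =
        l.foldl (fun acc i => some (match acc with | none => g i | some m => max m (g i))) acc := by
  induction l with
  | nil => intro acc; rfl
  | cons a l ih =>
    intro acc
    rw [List.foldl_cons, List.foldl_cons, h a List.mem_cons_self]
    exact ih (fun i hi => h i (List.mem_cons_of_mem _ hi)) _

-- the per-index expressions of the two final loops, and the bridge between them
def valA (ratings : List Int) (i : Nat) : Int :=
  pvGet ratings i *
    ((pyPrefix ratings).getD ((pyRight ratings).getD i 0).toNat 0 -
      (pyPrefix ratings).getD (((pyLeft ratings).getD i 0) + 1).toNat 0)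

def valB (ratings : List Int) (i : Nat) : Int :=
  pvGet ratings i *
    (pvGet ratings i + altLeftSum ratings (pvGet ratings i) i +
      altRightSum ratings (pvGet ratings i) (i + 1))

theorem getD_map_range (f : Nat → Int) (n i : Nat) (h : i < n) :
    ((List.range n).map f).getD i 0 = f i := by
  rw [List.getD_eq_getElem?_getD]
  simp [h]

theorem val_eq (ratings : List Int) (i : Nat) (hi : i < ratings.length) :
    valA ratings i = valB ratings i := by
  unfold valA valB
  rw [pyLeft_eq, pyRight_eq, getD_map_range _ _ _ hi, getD_map_range _ _ _ hi]
  exact value_eq ratings i hi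

-- ===== VERDICT (by name: the statement is the Claim_ definition above) =====
theorem driversRatings_spec : Claim_equal_driversRatings := by
  intro ratings _ _
  show driversRatings ratings = driversRatings_alt ratings
  have hA : driversRatings ratings =
      ((List.range ratings.length).foldl (fun (acc : Option Int) i =>
        some (match acc with | none => valA ratings i | some m => max m (valA ratings i))) none).getD 0 := rfl
  have hB : driversRatings_alt ratings =
      ((List.range ratings.length).foldl (fun (acc : Option Int) i =>
        some (match acc with | none => valB ratings i | some m => max m (valB ratings i))) none).getD 0 := rfl
  rw [hA, hB]
  exact congrArg (fun o => Option.getD o 0)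
    (foldl_max_congr (valA ratings) (valB ratings) _
      (fun i hi => val_eq ratings i (List.mem_range.mp hi)) none)
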